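-- pv_equiv track=rewrite | github.com/oigomezz/Retos | Hackerearth/Data-Structures/Arrays/1D/Infinite-Arrays/solution.py | solve
-- ===== SOURCE A (Python) =====
-- from itertools import accumulate
--
-- def solve(a, r, l):
--     n = len(a)
--     sums = list(accumulate(a, initial=0))
--     last = sums[-1]
--     for i in range(len(l)):
--         left = l[i] - 1
--         x = (left // n) * last + sums[left % n]
--         right = r[i]
--         y = (right // n) * last + sums[right % n]
--         yield (y - x) % 1000000007
-- ===== SOURCE B (Python) =====
-- MOD = 1000000007
--
-- def _prefix(a, n, total, k):
--     # sum of the first k elements of the infinitely repeated array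
--     q, rem = divmod(k, n)
--     return q * total + sum(a[:rem])
--
-- def solve(a, r, l):
--     n = len(a)
--     total = sum(a)
--     for lo, hi in zip(l, r):
--         yield (_prefix(a, n, total, hi) - _prefix(a, n, total, lo - 1)) % MOD
-- ===== Notes on version B (the rewrite author's own statement) =====
-- stated objective: simpler
-- what changed: Drops the precomputed accumulate prefix-sum table and the index loop: B zips l with r and answers each query with a small closed-form helper (divmod into whole cycles times sum(a) plus a direct sum of the needed prefix slice).
import Mathlib
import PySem

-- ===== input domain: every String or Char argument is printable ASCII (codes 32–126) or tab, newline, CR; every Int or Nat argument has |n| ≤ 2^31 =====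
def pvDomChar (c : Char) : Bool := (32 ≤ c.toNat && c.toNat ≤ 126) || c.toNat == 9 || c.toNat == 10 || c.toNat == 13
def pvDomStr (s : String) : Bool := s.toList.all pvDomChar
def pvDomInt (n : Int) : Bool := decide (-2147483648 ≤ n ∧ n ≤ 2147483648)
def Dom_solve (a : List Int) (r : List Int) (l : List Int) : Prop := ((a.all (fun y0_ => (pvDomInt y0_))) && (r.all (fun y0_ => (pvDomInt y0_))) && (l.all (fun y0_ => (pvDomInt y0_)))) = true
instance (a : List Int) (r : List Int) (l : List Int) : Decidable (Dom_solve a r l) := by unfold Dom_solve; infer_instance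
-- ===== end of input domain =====

-- B drops A's precomputed prefix-sum table: each query is answered by a divmod
-- closed-form helper over zip(l, r); return-value equivalence (both yield the same stream).

-- ===== PORT A =====
-- accumulate(a, initial=0): running prefix sums, starting with 0
def solve (a : List Int) (r : List Int) (l : List Int) : List Int :=
  let n : Int := a.length
  let sums : List Int := (a.foldl (fun st x => (st.1 ++ [st.2 + x], st.2 + x)) ([(0 : Int)], (0 : Int))).1
  let last : Int := PySem.List.pyGetD sums (-1) 0
  (List.range l.length).foldl (fun (out : List Int) (i : Nat) =>
    let left : Int := PySem.List.pyGetD l (i : Int) 0 - 1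
    let x : Int := (PySem.Int.floordiv left n) * last + PySem.List.pyGetD sums (PySem.Int.mod left n) 0
    let right : Int := PySem.List.pyGetD r (i : Int) 0
    let y : Int := (PySem.Int.floordiv right n) * last + PySem.List.pyGetD sums (PySem.Int.mod right n) 0
    out ++ [PySem.Int.mod (y - x) 1000000007]) []

-- ===== PORT B =====
-- Source B's _prefix: sum of the first k elements of the infinitely repeated array,
-- q = k // n whole cycles (q, rem = divmod(k, n)) plus the partial slice sum(a[:rem])
def solvePrefix (a : List Int) (n : Int) (total : Int) (k : Int) : Int :=
  (PySem.Int.floordiv k n) * total + (PySem.List.slice a none (some (PySem.Int.mod k n))).sum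

def solve_alt (a : List Int) (r : List Int) (l : List Int) : List Int :=
  let n : Int := a.length
  let total : Int := a.sum
  (l.zip r).map (fun p =>
    PySem.Int.mod (solvePrefix a n total p.2 - solvePrefix a n total (p.1 - 1)) 1000000007)

-- ===== PRECONDITION & SPEC =====
-- Pre_ excludes exactly the inputs where A raises: r shorter than l (IndexError at r[i])
-- and a = [] with a nonempty query list (ZeroDivisionError in left // n).
def Pre_solve (a : List Int) (r : List Int) (l : List Int) : Prop :=
  l.length ≤ r.length ∧ (l = [] ∨ a ≠ [])
instance (a : List Int) (r : List Int) (l : List Int) : Decidable (Pre_solve a r l) := by unfold Pre_solve; infer_instance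

def pvWitness_solve : List Int × List Int × List Int := ([1, 2, 3], [5, 10], [1, 2])

def Spec_solve (a : List Int) (r : List Int) (l : List Int) (out : List Int) : Prop := out = solve_alt a r l
instance (a : List Int) (r : List Int) (l : List Int) (out : List Int) : Decidable (Spec_solve a r l out) := by unfold Spec_solve; infer_instance

-- ===== CLAIM (what is proved, stated in full; the proofs are below) =====
def Claim_equal_solve : Prop := ∀ (a : List Int) (r : List Int) (l : List Int), Dom_solve a r l → Pre_solve a r l → Spec_solve a r l (solve a r l)

-- ===== LEMMAS AND PROOFS =====

-- the running prefix-sum table produced by A's accumulate fold, starting from s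
def solvePT : List Int → Int → List Int
  | [], _ => []
  | x :: t, s => (s + x) :: solvePT t (s + x)

theorem solve_fold_pt (a : List Int) (acc : List Int) (s : Int) :
    a.foldl (fun st x => (st.1 ++ [st.2 + x], st.2 + x)) (acc, s)
      = (acc ++ solvePT a s, s + a.sum) := by
  induction a generalizing acc s with
  | nil => simp [solvePT]
  | cons h t ih =>
      simp only [List.foldl_cons, ih, solvePT, List.sum_cons]
      rw [Prod.mk.injEq]
      exact ⟨by simp, by ring⟩

theorem solvePT_getD (a : List Int) (s : Int) (k : Nat) (h : k < a.length) :
    (solvePT a s).getD k 0 = s + (a.take (k + 1)).sum := by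
  induction a generalizing s k with
  | nil => simp at h
  | cons x t ih =>
      cases k with
      | zero => simp [solvePT]
      | succ m =>
          have hm : m < t.length := by simpa using h
          simp only [solvePT, List.getD_cons_succ]
          rw [ih (s + x) m hm]
          simp [List.take_succ_cons]
          ring

theorem solvePT_cons_getLast (a : List Int) (s x : Int) :
    (x :: solvePT a s).getLast (List.cons_ne_nil _ _) = if a = [] then x else s + a.sum := by
  induction a generalizing s x with
  | nil => simp [solvePT]
  | cons h t ih =>
      simp only [solvePT, List.getLast_cons (List.cons_ne_nil _ _)]
      rw [ih (s + h) (s + h)]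
      by_cases ht : t = []
      · simp [ht]
      · simp [ht]
        ring

theorem solve_sums_getD (a : List Int) (m : Nat) (hm : m ≤ a.length) :
    ((a.foldl (fun st x => (st.1 ++ [st.2 + x], st.2 + x)) ([(0 : Int)], (0 : Int))).1).getD m 0
      = (a.take m).sum := by
  rw [solve_fold_pt]
  cases m with
  | zero => simp
  | succ k =>
      have hk : k < a.length := by omega
      simp only [List.singleton_append, List.getD_cons_succ]
      rw [solvePT_getD a 0 k hk]
      simp

theorem solve_sums_last (a : List Int) :
    PySem.List.pyGetD ((a.foldl (fun st x => (st.1 ++ [st.2 + x], st.2 + x)) ([(0 : Int)], (0 : Int))).1) (-1) 0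
      = a.sum := by
  rw [solve_fold_pt]
  simp only [List.singleton_append]
  rw [PySem.List.pyGetD_neg_one _ _ (List.cons_ne_nil _ _)]
  rw [solvePT_cons_getLast a 0 0]
  by_cases ha : a = [] <;> simp [ha]

-- per-query agreement: A's table lookup equals B's closed-form helper
theorem solve_query_eq (a : List Int) (k : Int) (ha : a ≠ []) :
    (PySem.Int.floordiv k (a.length : Int)) * a.sum
      + PySem.List.pyGetD ((a.foldl (fun st x => (st.1 ++ [st.2 + x], st.2 + x)) ([(0 : Int)], (0 : Int))).1) (PySem.Int.mod k (a.length : Int)) 0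
      = solvePrefix a (a.length : Int) a.sum k := by
  have hn : (0 : Int) < (a.length : Int) := by
    have := List.length_pos_iff.mpr ha; exact_mod_cast this
  have hmod : PySem.Int.mod k (a.length : Int) = k % (a.length : Int) :=
    PySem.Int.mod_eq_emod_of_pos hn
  have hmod0 : 0 ≤ PySem.Int.mod k (a.length : Int) := by
    rw [hmod]; exact Int.emod_nonneg k (by omega)
  have hmodlt : PySem.Int.mod k (a.length : Int) < (a.length : Int) := by
    rw [hmod]; exact Int.emod_lt_of_pos k hn
  unfold solvePrefix
  rw [PySem.List.slice_to a hmod0]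
  congr 1
  rw [PySem.List.pyGetD, PySem.List.pyGet?_of_nonneg _ hmod0]
  have hle : (PySem.Int.mod k (a.length : Int)).toNat ≤ a.length := by omega
  have hgd := solve_sums_getD a (PySem.Int.mod k (a.length : Int)).toNat hle
  rw [List.getD] at hgd
  simpa using hgd

-- ===== VERDICT (by name: the statement is the Claim_ definition above) =====
theorem solve_spec : Claim_equal_solve := by
  intro a r l _ hpre
  obtain ⟨hlen, hcase⟩ := hpre
  unfold Spec_solve
  by_cases hl : l = []
  · subst hl; simp [solve, solve_alt]
  · have ha : a ≠ [] := hcase.resolve_left hl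
    simp only [solve, solve_alt]
    rw [PySem.List.foldl_append_singleton_eq_map, List.nil_append]
    rw [solve_sums_last a]
    apply List.ext_getElem
    · simp; omega
    · intro i h1 h2
      simp only [List.getElem_map, List.getElem_range, List.getElem_zip]
      have hi : i < l.length := by simpa using h1
      have hir : i < r.length := by omega
      rw [PySem.List.pyGetD_natCast, PySem.List.pyGetD_natCast]
      rw [List.getD_eq_getElem l 0 hi, List.getD_eq_getElem r 0 hir]
      rw [solve_query_eq a _ ha, solve_query_eq a _ ha]
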